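-- pv_equiv track=rewrite | github.com/lapeko/algoexpert | algorithms/arrays/32-minimum-area-rectangle/3.py | minimumAreaRectangle
-- ===== SOURCE A (Python) =====
-- def minimumAreaRectangle(points):
--     minArea = 0
--     pointsMap = {}
--
--     for p in points:
--         if p[0] not in pointsMap:
--             pointsMap[p[0]] = set()
--         pointsMap[p[0]].add(p[1])
--
--     for idx1 in range(len(points) - 1):
--         for idx2 in range(idx1 + 1, len(points)):
--             p1, p2 = points[idx1], points[idx2]
--             if p1[0] == p2[0] or p1[1] == p2[1]:
--                 continue
--             if p1[1] not in pointsMap[p2[0]] or p2[1] not in pointsMap[p1[0]]: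
--                 continue
--             area = abs((p2[0] - p1[0]) * (p2[1] - p1[1]))
--             if minArea == 0 or area < minArea:
--                 minArea = area
--     return minArea
-- ===== SOURCE B (Python) =====
-- def minimumAreaRectangle(points):
--     cols = {}
--     for p in points:
--         cols.setdefault(p[0], set()).add(p[1])
--     xs = sorted(cols)
--     best = 0
--     for i in range(len(xs)):
--         for j in range(i + 1, len(xs)):
--             ys = sorted(cols[xs[i]] & cols[xs[j]])
--             for k in range(1, len(ys)):
--                 area = (xs[j] - xs[i]) * (ys[k] - ys[k - 1])
--                 if best == 0 or area < best:
--                     best = area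
--     return best
-- ===== Notes on version B (the rewrite author's own statement) =====
-- stated objective: alternative
-- what changed: B replaces A's scan over all index pairs of the raw point list (with a per-pair diagonal-corner check) by grouping points into columns keyed by x, sorting, and for each pair of columns scanning only consecutive gaps of their common sorted y-values, which preserves the minimum.
import Mathlib
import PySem

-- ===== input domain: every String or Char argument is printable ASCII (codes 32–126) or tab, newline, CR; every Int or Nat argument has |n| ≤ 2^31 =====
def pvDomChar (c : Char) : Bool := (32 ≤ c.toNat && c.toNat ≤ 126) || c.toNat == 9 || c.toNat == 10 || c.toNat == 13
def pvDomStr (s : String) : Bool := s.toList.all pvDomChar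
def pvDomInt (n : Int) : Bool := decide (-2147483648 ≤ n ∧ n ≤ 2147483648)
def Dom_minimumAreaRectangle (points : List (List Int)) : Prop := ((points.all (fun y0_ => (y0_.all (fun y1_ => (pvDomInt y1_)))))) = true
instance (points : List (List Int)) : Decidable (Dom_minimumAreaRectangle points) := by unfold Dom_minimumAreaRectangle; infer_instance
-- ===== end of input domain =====

-- B groups the points into columns (x -> set of ys), sorts, and scans pairs of columns taking
-- only CONSECUTIVE gaps of their common ys — an alternative algorithm, same result (return value only).

-- p[0] and p[1] (total accessors; Pre_ guarantees the index is in range)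
def ptX (p : List Int) : Int := PySem.List.pyGetD p 0 0
def ptY (p : List Int) : Int := PySem.List.pyGetD p 1 0

-- ===== PORT A =====
-- A's first loop: if p[0] not in pointsMap: pointsMap[p[0]] = set();  pointsMap[p[0]].add(p[1])
def buildMapA (points : List (List Int)) : PySem.Dict Int (PySem.Set Int) :=
  points.foldl (fun m p =>
    let m := if PySem.Dict.contains m (ptX p) then m
             else PySem.Dict.insert m (ptX p) PySem.Set.empty
    PySem.Dict.insert m (ptX p)
      (PySem.Set.add (PySem.Dict.getD m (ptX p) PySem.Set.empty) (ptY p))) PySem.Dict.empty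

def minimumAreaRectangle (points : List (List Int)) : Int :=
  let pointsMap := buildMapA points
  (PySem.List.pyRange 0 ((points.length : Int) - 1) 1).foldl (fun minArea idx1 =>
    (PySem.List.pyRange (idx1 + 1) (points.length : Int) 1).foldl (fun minArea idx2 =>
      let p1 := PySem.List.pyGetD points idx1 []
      let p2 := PySem.List.pyGetD points idx2 []
      if ptX p1 = ptX p2 ∨ ptY p1 = ptY p2 then minArea
      else if ptY p1 ∉ PySem.Dict.getD pointsMap (ptX p2) PySem.Set.empty ∨
              ptY p2 ∉ PySem.Dict.getD pointsMap (ptX p1) PySem.Set.empty then minArea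
        -- pointsMap[p2[0]] is a plain lookup whose key is always present; the getD default is never used
      else
        let area := |(ptX p2 - ptX p1) * (ptY p2 - ptY p1)|
        if minArea = 0 ∨ area < minArea then area else minArea) minArea) 0

-- ===== PORT B =====
-- B's first loop: cols.setdefault(p[0], set()).add(p[1])  =  cols[p[0]] = cols.get(p[0], set()) ∪ {p[1]}
def colsOf (points : List (List Int)) : PySem.Dict Int (PySem.Set Int) :=
  points.foldl (fun m p =>
    PySem.Dict.modify m (ptX p) PySem.Set.empty (fun s => PySem.Set.add s (ptY p))) PySem.Dict.empty

def minimumAreaRectangle_alt (points : List (List Int)) : Int :=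
  let cols := colsOf points
  let xs := PySem.List.sorted (PySem.Dict.keys cols) (fun x => x) false
  (PySem.List.pyRange 0 (xs.length : Int) 1).foldl (fun best i =>
    (PySem.List.pyRange (i + 1) (xs.length : Int) 1).foldl (fun best j =>
      let ys := PySem.List.sorted
        (PySem.Set.inter (PySem.Dict.getD cols (PySem.List.pyGetD xs i 0) PySem.Set.empty)
                         (PySem.Dict.getD cols (PySem.List.pyGetD xs j 0) PySem.Set.empty))
        (fun y => y) false
        -- cols[xs[i]] is a plain lookup whose key is always present; the getD default is never used
      (PySem.List.pyRange 1 (ys.length : Int) 1).foldl (fun best k =>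
        let area := (PySem.List.pyGetD xs j 0 - PySem.List.pyGetD xs i 0) *
                    (PySem.List.pyGetD ys k 0 - PySem.List.pyGetD ys (k - 1) 0)
        if best = 0 ∨ area < best then area else best) best) best) 0

-- ===== PRECONDITION & SPEC =====
-- Pre_ excludes points with fewer than two coordinates, on which the Python A raises IndexError at p[1] (or p[0]).
def Pre_minimumAreaRectangle (points : List (List Int)) : Prop := ∀ p ∈ points, 2 ≤ p.length
instance (points : List (List Int)) : Decidable (Pre_minimumAreaRectangle points) := by unfold Pre_minimumAreaRectangle; infer_instance
def pvWitness_minimumAreaRectangle : List (List Int) := [[0, 0], [0, 2], [2, 0], [2, 2], [1, 1]]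

def Spec_minimumAreaRectangle (points : List (List Int)) (out : Int) : Prop := out = minimumAreaRectangle_alt points
instance (points : List (List Int)) (out : Int) : Decidable (Spec_minimumAreaRectangle points out) := by unfold Spec_minimumAreaRectangle; infer_instance

-- ===== CLAIM (what is proved, stated in full; the proofs are below) =====
def Claim_equal_minimumAreaRectangle : Prop := ∀ (points : List (List Int)), Dom_minimumAreaRectangle points → Pre_minimumAreaRectangle points → Spec_minimumAreaRectangle points (minimumAreaRectangle points)

-- ===== LEMMAS AND PROOFS =====

-- the running-minimum step shared by both loops (sentinel 0 = "nothing yet")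
def mstep (m a : Int) : Int := if m = 0 ∨ a < m then a else m

-- (x, y) occurs among the (first two coordinates of the) points
def memPt (points : List (List Int)) (x y : Int) : Prop :=
  ∃ p ∈ points, ptX p = x ∧ ptY p = y

-- v is the area of some axis-aligned rectangle with all four corners among the points
def Rect (points : List (List Int)) (v : Int) : Prop :=
  ∃ x1 x2 y1 y2, x1 < x2 ∧ y1 < y2 ∧
    memPt points x1 y1 ∧ memPt points x1 y2 ∧ memPt points x2 y1 ∧ memPt points x2 y2 ∧
    v = (x2 - x1) * (y2 - y1)

-- candidate areas examined by A, as one flat list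
def LA (points : List (List Int)) : List Int :=
  (PySem.List.pyRange 0 ((points.length : Int) - 1) 1).flatMap (fun idx1 =>
    (PySem.List.pyRange (idx1 + 1) (points.length : Int) 1).filterMap (fun idx2 =>
      if ¬(ptX (PySem.List.pyGetD points idx1 []) = ptX (PySem.List.pyGetD points idx2 []) ∨
           ptY (PySem.List.pyGetD points idx1 []) = ptY (PySem.List.pyGetD points idx2 [])) ∧
         ¬(ptY (PySem.List.pyGetD points idx1 []) ∉
             PySem.Dict.getD (buildMapA points) (ptX (PySem.List.pyGetD points idx2 [])) PySem.Set.empty ∨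
           ptY (PySem.List.pyGetD points idx2 []) ∉
             PySem.Dict.getD (buildMapA points) (ptX (PySem.List.pyGetD points idx1 [])) PySem.Set.empty)
      then some |(ptX (PySem.List.pyGetD points idx2 []) - ptX (PySem.List.pyGetD points idx1 [])) *
                 (ptY (PySem.List.pyGetD points idx2 []) - ptY (PySem.List.pyGetD points idx1 []))|
      else none))

-- the sorted list of distinct x coordinates, and the sorted common ys of two columns
def xsOf (points : List (List Int)) : List Int :=
  PySem.List.sorted (PySem.Dict.keys (colsOf points)) (fun x => x) false

def ysOf (points : List (List Int)) (xi xj : Int) : List Int :=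
  PySem.List.sorted
    (PySem.Set.inter (PySem.Dict.getD (colsOf points) xi PySem.Set.empty)
                     (PySem.Dict.getD (colsOf points) xj PySem.Set.empty)) (fun y => y) false

-- candidate areas examined by B, as one flat list
def LB (points : List (List Int)) : List Int :=
  (PySem.List.pyRange 0 ((xsOf points).length : Int) 1).flatMap (fun i =>
    (PySem.List.pyRange (i + 1) ((xsOf points).length : Int) 1).flatMap (fun j =>
      (PySem.List.pyRange 1
          ((ysOf points (PySem.List.pyGetD (xsOf points) i 0) (PySem.List.pyGetD (xsOf points) j 0)).length : Int)
          1).map (fun k =>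
        (PySem.List.pyGetD (xsOf points) j 0 - PySem.List.pyGetD (xsOf points) i 0) *
        (PySem.List.pyGetD (ysOf points (PySem.List.pyGetD (xsOf points) i 0) (PySem.List.pyGetD (xsOf points) j 0)) k 0 -
         PySem.List.pyGetD (ysOf points (PySem.List.pyGetD (xsOf points) i 0) (PySem.List.pyGetD (xsOf points) j 0)) (k - 1) 0))))

theorem foldl_guard_filterMap {α : Type} (l : List α) (c : α → Prop) [DecidablePred c]
    (g : α → Int) (init : Int) :
    l.foldl (fun m x => if c x then mstep m (g x) else m) init
      = (l.filterMap (fun x => if c x then some (g x) else none)).foldl mstep init := by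
  induction l generalizing init with
  | nil => rfl
  | cons a t ih =>
    by_cases h : c a <;> simp [h, ih]

theorem A_eq_foldl_LA (points : List (List Int)) :
    minimumAreaRectangle points = (LA points).foldl mstep 0 := by
  unfold minimumAreaRectangle LA
  rw [List.foldl_flatMap]
  apply PySem.List.foldl_congr_mem
  intro acc i _
  rw [show (fun (m : Int) (j : Int) =>
        if ptX (PySem.List.pyGetD points i []) = ptX (PySem.List.pyGetD points j []) ∨
           ptY (PySem.List.pyGetD points i []) = ptY (PySem.List.pyGetD points j []) then m
        else if ptY (PySem.List.pyGetD points i []) ∉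
                PySem.Dict.getD (buildMapA points) (ptX (PySem.List.pyGetD points j [])) PySem.Set.empty ∨
                ptY (PySem.List.pyGetD points j []) ∉
                PySem.Dict.getD (buildMapA points) (ptX (PySem.List.pyGetD points i [])) PySem.Set.empty then m
        else
          let area := |(ptX (PySem.List.pyGetD points j []) - ptX (PySem.List.pyGetD points i [])) *
                       (ptY (PySem.List.pyGetD points j []) - ptY (PySem.List.pyGetD points i []))|
          if m = 0 ∨ area < m then area else m)
      = fun (m : Int) (j : Int) =>
        if ¬(ptX (PySem.List.pyGetD points i []) = ptX (PySem.List.pyGetD points j []) ∨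
             ptY (PySem.List.pyGetD points i []) = ptY (PySem.List.pyGetD points j [])) ∧
           ¬(ptY (PySem.List.pyGetD points i []) ∉
                PySem.Dict.getD (buildMapA points) (ptX (PySem.List.pyGetD points j [])) PySem.Set.empty ∨
             ptY (PySem.List.pyGetD points j []) ∉
                PySem.Dict.getD (buildMapA points) (ptX (PySem.List.pyGetD points i [])) PySem.Set.empty)
        then mstep m (|(ptX (PySem.List.pyGetD points j []) - ptX (PySem.List.pyGetD points i [])) *
                       (ptY (PySem.List.pyGetD points j []) - ptY (PySem.List.pyGetD points i []))|)
        else m from by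
      funext m j
      simp only [mstep]
      split_ifs <;> tauto]
  exact foldl_guard_filterMap _ _ _ _

theorem B_eq_foldl_LB (points : List (List Int)) :
    minimumAreaRectangle_alt points = (LB points).foldl mstep 0 := by
  unfold minimumAreaRectangle_alt LB xsOf ysOf colsOf
  simp only [List.foldl_flatMap, List.foldl_map]
  rfl

theorem getD_build_mem (f : PySem.Dict Int (PySem.Set Int) → List Int → PySem.Dict Int (PySem.Set Int))
    (hf : ∀ m p x, PySem.Dict.getD (f m p) x PySem.Set.empty =
        if x = ptX p then PySem.Set.add (PySem.Dict.getD m x PySem.Set.empty) (ptY p)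
        else PySem.Dict.getD m x PySem.Set.empty)
    (ps : List (List Int)) (m : PySem.Dict Int (PySem.Set Int)) (x y : Int) :
    y ∈ PySem.Dict.getD (ps.foldl f m) x PySem.Set.empty ↔
      y ∈ PySem.Dict.getD m x PySem.Set.empty ∨ ∃ p ∈ ps, ptX p = x ∧ ptY p = y := by
  induction ps generalizing m with
  | nil => simp
  | cons p t ih =>
    rw [List.foldl_cons, ih, hf]
    by_cases hx : x = ptX p
    · rw [if_pos hx, PySem.Set.mem_add]
      simp only [List.mem_cons]
      constructor
      · rintro ((h | h) | h)
        · exact Or.inl h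
        · exact Or.inr ⟨p, Or.inl rfl, hx.symm, h.symm⟩
        · obtain ⟨q, hq, h1, h2⟩ := h; exact Or.inr ⟨q, Or.inr hq, h1, h2⟩
      · rintro (h | ⟨q, (rfl | hq), h1, h2⟩)
        · exact Or.inl (Or.inl h)
        · exact Or.inl (Or.inr h2.symm)
        · exact Or.inr ⟨q, hq, h1, h2⟩
    · rw [if_neg hx]
      simp only [List.mem_cons]
      constructor
      · rintro (h | ⟨q, hq, h1, h2⟩)
        · exact Or.inl h
        · exact Or.inr ⟨q, Or.inr hq, h1, h2⟩
      · rintro (h | ⟨q, (rfl | hq), h1, h2⟩)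
        · exact Or.inl h
        · exact absurd h1.symm hx
        · exact Or.inr ⟨q, hq, h1, h2⟩

theorem nodup_build (f : PySem.Dict Int (PySem.Set Int) → List Int → PySem.Dict Int (PySem.Set Int))
    (hf : ∀ m p x, PySem.Dict.getD (f m p) x PySem.Set.empty =
        if x = ptX p then PySem.Set.add (PySem.Dict.getD m x PySem.Set.empty) (ptY p)
        else PySem.Dict.getD m x PySem.Set.empty)
    (ps : List (List Int)) (m : PySem.Dict Int (PySem.Set Int))
    (hm : ∀ x, (PySem.Dict.getD m x PySem.Set.empty).Nodup) (x : Int) :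
    (PySem.Dict.getD (ps.foldl f m) x PySem.Set.empty).Nodup := by
  induction ps generalizing m with
  | nil => exact hm x
  | cons p t ih =>
    rw [List.foldl_cons]
    refine ih (f m p) (fun x' => ?_)
    rw [hf]
    by_cases hx : x' = ptX p
    · simpa [hx] using PySem.Set.nodup_add _ _ (hm (ptX p))
    · simpa [hx] using hm x'

theorem hf_colsStep : ∀ (m : PySem.Dict Int (PySem.Set Int)) (p : List Int) (x : Int),
    PySem.Dict.getD (PySem.Dict.modify m (ptX p) PySem.Set.empty (fun s => PySem.Set.add s (ptY p))) x PySem.Set.empty =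
      if x = ptX p then PySem.Set.add (PySem.Dict.getD m x PySem.Set.empty) (ptY p)
      else PySem.Dict.getD m x PySem.Set.empty := by
  intro m p x
  rw [PySem.Dict.getD_modify]
  by_cases hx : x = ptX p <;> simp [hx]

theorem hf_mapAStep : ∀ (m : PySem.Dict Int (PySem.Set Int)) (p : List Int) (x : Int),
    PySem.Dict.getD
      (PySem.Dict.insert (if PySem.Dict.contains m (ptX p) then m else PySem.Dict.insert m (ptX p) PySem.Set.empty)
        (ptX p)
        (PySem.Set.add
          (PySem.Dict.getD (if PySem.Dict.contains m (ptX p) then m else PySem.Dict.insert m (ptX p) PySem.Set.empty)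
            (ptX p) PySem.Set.empty) (ptY p))) x PySem.Set.empty =
      if x = ptX p then PySem.Set.add (PySem.Dict.getD m x PySem.Set.empty) (ptY p)
      else PySem.Dict.getD m x PySem.Set.empty := by
  intro m p x
  by_cases hc : PySem.Dict.contains m (ptX p)
  · simp only [hc, if_true]
    rw [PySem.Dict.getD_insert]
    by_cases hx : x = ptX p <;> simp [hx]
  · simp only [hc, Bool.false_eq_true, if_false]
    have h0 : PySem.Dict.getD m (ptX p) PySem.Set.empty = PySem.Set.empty :=
      PySem.Dict.getD_of_not_contains m _ (by simpa using hc)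
    rw [PySem.Dict.getD_insert, PySem.Dict.getD_insert]
    simp only [PySem.Set.empty] at h0
    by_cases hx : x = ptX p
    · simp [hx, h0, PySem.Set.add]
    · simp [hx, PySem.Dict.getD_insert]

theorem getD_buildMapA (points : List (List Int)) (x y : Int) :
    y ∈ PySem.Dict.getD (buildMapA points) x PySem.Set.empty ↔ memPt points x y := by
  unfold buildMapA memPt
  rw [getD_build_mem _ hf_mapAStep]
  simp [PySem.Dict.getD_empty, PySem.Set.empty]

theorem getD_colsOf (points : List (List Int)) (x y : Int) :
    y ∈ PySem.Dict.getD (colsOf points) x PySem.Set.empty ↔ memPt points x y := by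
  unfold colsOf memPt
  rw [getD_build_mem _ hf_colsStep]
  simp [PySem.Dict.getD_empty, PySem.Set.empty]

theorem nodup_getD_colsOf (points : List (List Int)) (x : Int) :
    (PySem.Dict.getD (colsOf points) x PySem.Set.empty).Nodup := by
  unfold colsOf
  exact nodup_build _ hf_colsStep _ _ (fun x' => by simp [PySem.Dict.getD_empty, PySem.Set.empty]) x

theorem mem_keys_colsOf (points : List (List Int)) (x : Int) :
    x ∈ PySem.Dict.keys (colsOf points) ↔ ∃ p ∈ points, ptX p = x := by
  unfold colsOf
  rw [PySem.Dict.keys_foldl_modify_key points ptX PySem.Set.empty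
        (fun _ p => fun s => PySem.Set.add s (ptY p)) PySem.Dict.empty]
  simp [PySem.Set.mem_update]

theorem nodup_keys_colsOf (points : List (List Int)) : (PySem.Dict.keys (colsOf points)).Nodup := by
  unfold colsOf
  exact PySem.Dict.nodup_keys_foldl_modify_key points ptX PySem.Set.empty
    (fun _ p => fun s => PySem.Set.add s (ptY p)) PySem.Dict.empty (by simp)

theorem abs_sub_eq (a b : Int) : |a - b| = max a b - min a b := by
  rcases le_total a b with h | h
  · rw [abs_of_nonpos (by omega), max_eq_right h, min_eq_left h]; ring
  · rw [abs_of_nonneg (by omega), max_eq_left h, min_eq_right h]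

theorem Rect_of_corners (points : List (List Int)) (x1 x2 y1 y2 : Int)
    (hx : x1 ≠ x2) (hy : y1 ≠ y2)
    (h11 : memPt points x1 y1) (h12 : memPt points x1 y2)
    (h21 : memPt points x2 y1) (h22 : memPt points x2 y2) :
    Rect points |(x2 - x1) * (y2 - y1)| := by
  have hxm : min x1 x2 < max x1 x2 := min_lt_max.2 hx
  have hym : min y1 y2 < max y1 y2 := min_lt_max.2 hy
  refine ⟨min x1 x2, max x1 x2, min y1 y2, max y1 y2, hxm, hym, ?_, ?_, ?_, ?_, ?_⟩
  · rcases le_total x1 x2 with h | h <;> rcases le_total y1 y2 with h' | h' <;>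
      simp [h, h', h11, h12, h21, h22]
  · rcases le_total x1 x2 with h | h <;> rcases le_total y1 y2 with h' | h' <;>
      simp [h, h', h11, h12, h21, h22]
  · rcases le_total x1 x2 with h | h <;> rcases le_total y1 y2 with h' | h' <;>
      simp [h, h', h11, h12, h21, h22]
  · rcases le_total x1 x2 with h | h <;> rcases le_total y1 y2 with h' | h' <;>
      simp [h, h', h11, h12, h21, h22]
  · rw [abs_mul, abs_sub_eq x2 x1, abs_sub_eq y2 y1, max_comm x2 x1, min_comm x2 x1,
        max_comm y2 y1, min_comm y2 y1]

theorem memPt_getElem (points : List (List Int)) (i : Nat) (h : i < points.length) :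
    memPt points (ptX points[i]) (ptY points[i]) :=
  ⟨points[i], List.getElem_mem h, rfl, rfl⟩

theorem LA_pair (points : List (List Int)) (a b : Nat) (ha : a < points.length)
    (hb : b < points.length) (hab : a < b)
    (hx : ptX points[a] ≠ ptX points[b]) (hy : ptY points[a] ≠ ptY points[b])
    (hm1 : ptY points[a] ∈ PySem.Dict.getD (buildMapA points) (ptX points[b]) PySem.Set.empty)
    (hm2 : ptY points[b] ∈ PySem.Dict.getD (buildMapA points) (ptX points[a]) PySem.Set.empty) :
    |(ptX points[b] - ptX points[a]) * (ptY points[b] - ptY points[a])| ∈ LA points := by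
  unfold LA
  rw [List.mem_flatMap]
  refine ⟨(a : Int), ?_, ?_⟩
  · rw [PySem.List.mem_pyRange_one]; omega
  · rw [List.mem_filterMap]
    refine ⟨(b : Int), by rw [PySem.List.mem_pyRange_one]; omega, ?_⟩
    have e1 : PySem.List.pyGetD points (a : Int) [] = points[a] := by
      rw [PySem.List.pyGetD_eq_getElem points [] (by omega) (by omega)]; simp
    have e2 : PySem.List.pyGetD points (b : Int) [] = points[b] := by
      rw [PySem.List.pyGetD_eq_getElem points [] (by omega) (by omega)]; simp
    simp only [e1, e2]
    rw [if_pos ⟨by tauto, by tauto⟩]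

theorem mem_LA_iff_Rect (points : List (List Int)) (v : Int) :
    v ∈ LA points ↔ Rect points v := by
  constructor
  · intro h
    unfold LA at h
    rw [List.mem_flatMap] at h
    obtain ⟨i, hi, h⟩ := h
    rw [PySem.List.mem_pyRange_one] at hi
    rw [List.mem_filterMap] at h
    obtain ⟨j, hj, h⟩ := h
    rw [PySem.List.mem_pyRange_one] at hj
    split_ifs at h with hc
    · obtain ⟨hc1, hc2⟩ := hc
      push_neg at hc1 hc2
      obtain ⟨hm1, hm2⟩ := hc2
      rw [Option.some_inj] at h
      subst h
      have e1 : PySem.List.pyGetD points i [] = points[i.toNat]'(by omega) :=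
        PySem.List.pyGetD_eq_getElem points [] (by omega) (by omega)
      rw [e1] at hc1 hm1 hm2 ⊢
      have e2 : PySem.List.pyGetD points j [] = points[j.toNat]'(by omega) :=
        PySem.List.pyGetD_eq_getElem points [] (by omega) (by omega)
      rw [e2] at hc1 hm1 hm2 ⊢
      exact Rect_of_corners points _ _ _ _ hc1.1 hc1.2
        (memPt_getElem points i.toNat (by omega))
        ((getD_buildMapA points _ _).1 hm2)
        ((getD_buildMapA points _ _).1 hm1)
        (memPt_getElem points j.toNat (by omega))
  · rintro ⟨x1, x2, y1, y2, hx12, hy12, h11, h12, h21, h22, rfl⟩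
    obtain ⟨p, hp, hpx, hpy⟩ := h11
    obtain ⟨q, hq, hqx, hqy⟩ := h22
    obtain ⟨a, ha, hpa⟩ := List.mem_iff_getElem.1 hp
    obtain ⟨b, hb, hqb⟩ := List.mem_iff_getElem.1 hq
    have hne : a ≠ b := by
      intro e; subst e; rw [hpa] at hqb; subst hqb
      rw [hpx] at hqx; omega
    rcases Nat.lt_or_ge a b with hab | hab
    · have := LA_pair points a b ha hb hab
        (by rw [hpa, hqb, hpx, hqx]; omega) (by rw [hpa, hqb, hpy, hqy]; omega)
        (by rw [hpa, hqb, hpy, hqx]; exact (getD_buildMapA points _ _).2 h21)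
        (by rw [hpa, hqb, hpx, hqy]; exact (getD_buildMapA points _ _).2 h12)
      rw [hpa, hqb, hpx, hqx, hpy, hqy] at this
      rwa [abs_of_pos (mul_pos (by omega) (by omega))] at this
    · have hba : b < a := by omega
      have := LA_pair points b a hb ha hba
        (by rw [hpa, hqb, hpx, hqx]; omega) (by rw [hpa, hqb, hpy, hqy]; omega)
        (by rw [hpa, hqb, hqy, hpx]; exact (getD_buildMapA points _ _).2 h12)
        (by rw [hpa, hqb, hqx, hpy]; exact (getD_buildMapA points _ _).2 h21)
      rw [hpa, hqb, hpx, hqx, hpy, hqy] at this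
      have e : (x1 - x2) * (y1 - y2) = (x2 - x1) * (y2 - y1) := by ring
      rwa [e, abs_of_pos (mul_pos (by omega) (by omega))] at this

theorem pairwise_lt_of_nodup (l : List Int) (h1 : l.Pairwise (· ≤ ·)) (h2 : l.Nodup) :
    l.Pairwise (· < ·) := by
  rw [List.pairwise_iff_getElem] at h1 ⊢
  intro i j hi hj hij
  refine lt_of_le_of_ne (h1 i j hi hj hij) (fun e => ?_)
  have := (List.Nodup.getElem_inj_iff h2).1 e
  omega

theorem mem_xsOf (points : List (List Int)) (x : Int) :
    x ∈ xsOf points ↔ ∃ p ∈ points, ptX p = x := by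
  unfold xsOf
  rw [PySem.List.mem_sorted]
  exact mem_keys_colsOf points x

theorem pairwise_xsOf (points : List (List Int)) : (xsOf points).Pairwise (· < ·) :=
  pairwise_lt_of_nodup _ (PySem.List.sorted_pairwise _ _)
    ((PySem.List.sorted_perm _ _ _).nodup_iff.2 (nodup_keys_colsOf points))

theorem mem_ysOf (points : List (List Int)) (xi xj y : Int) :
    y ∈ ysOf points xi xj ↔ memPt points xi y ∧ memPt points xj y := by
  unfold ysOf
  rw [PySem.List.mem_sorted, PySem.Set.mem_inter, getD_colsOf, getD_colsOf]

theorem pairwise_ysOf (points : List (List Int)) (xi xj : Int) :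
    (ysOf points xi xj).Pairwise (· < ·) :=
  pairwise_lt_of_nodup _ (PySem.List.sorted_pairwise _ _)
    ((PySem.List.sorted_perm _ _ _).nodup_iff.2
      (PySem.Set.nodup_inter _ _ (nodup_getD_colsOf points xi)))

theorem indices_of_mem_lt (l : List Int) (hp : l.Pairwise (· < ·)) {a b : Int}
    (ha : a ∈ l) (hb : b ∈ l) (hab : a < b) :
    ∃ i j, ∃ (hi : i < l.length) (hj : j < l.length), i < j ∧ l[i] = a ∧ l[j] = b := by
  obtain ⟨i, hi, hia⟩ := List.mem_iff_getElem.1 ha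
  obtain ⟨j, hj, hjb⟩ := List.mem_iff_getElem.1 hb
  rw [List.pairwise_iff_getElem] at hp
  rcases lt_trichotomy i j with hij | hij | hij
  · exact ⟨i, j, hi, hj, hij, hia, hjb⟩
  · subst hij; rw [hia] at hjb; omega
  · have := hp j i hj hi hij; rw [hia, hjb] at this; omega

theorem mem_LB_Rect (points : List (List Int)) (v : Int) :
    v ∈ LB points → Rect points v := by
  intro h
  unfold LB at h
  simp only [List.mem_flatMap, List.mem_map, PySem.List.mem_pyRange_one] at h
  obtain ⟨i, ⟨hi0, hilen⟩, j, ⟨hij, hjlen⟩, k, ⟨hk1, hklen⟩, hv⟩ := h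
  have hiN : i.toNat < (xsOf points).length := by omega
  have hjN : j.toNat < (xsOf points).length := by omega
  rw [PySem.List.pyGetD_eq_getElem _ _ (by omega) (by omega),
      PySem.List.pyGetD_eq_getElem _ _ (by omega) (by omega)] at hklen hv
  have hkN : k.toNat < (ysOf points ((xsOf points)[i.toNat]) ((xsOf points)[j.toNat])).length := by omega
  have hkN' : (k - 1).toNat < (ysOf points ((xsOf points)[i.toNat]) ((xsOf points)[j.toNat])).length := by omega
  rw [PySem.List.pyGetD_eq_getElem _ _ (by omega) (by omega),
      PySem.List.pyGetD_eq_getElem _ _ (by omega) (by omega)] at hv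
  have hxlt := List.pairwise_iff_getElem.1 (pairwise_xsOf points) i.toNat j.toNat hiN hjN (by omega)
  have hylt := List.pairwise_iff_getElem.1
    (pairwise_ysOf points ((xsOf points)[i.toNat]) ((xsOf points)[j.toNat]))
    (k - 1).toNat k.toNat hkN' hkN (by omega)
  have hc1 := (mem_ysOf points _ _ _).1 (List.getElem_mem hkN')
  have hc2 := (mem_ysOf points _ _ _).1 (List.getElem_mem hkN)
  exact ⟨_, _, _, _, hxlt, hylt, hc1.1, hc2.1, hc1.2, hc2.2, hv.symm⟩

theorem Rect_le_LB (points : List (List Int)) (v : Int) :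
    Rect points v → ∃ b ∈ LB points, b ≤ v := by
  rintro ⟨x1, x2, y1, y2, hx, hy, h11, h12, h21, h22, rfl⟩
  have hx1 : x1 ∈ xsOf points := (mem_xsOf points x1).2 (by obtain ⟨p, hp, hpx, -⟩ := h11; exact ⟨p, hp, hpx⟩)
  have hx2 : x2 ∈ xsOf points := (mem_xsOf points x2).2 (by obtain ⟨p, hp, hpx, -⟩ := h22; exact ⟨p, hp, hpx⟩)
  obtain ⟨i, j, hi, hj, hij, hxi, hxj⟩ := indices_of_mem_lt _ (pairwise_xsOf points) hx1 hx2 hx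
  have hy1 : y1 ∈ ysOf points x1 x2 := (mem_ysOf points x1 x2 y1).2 ⟨h11, h21⟩
  have hy2 : y2 ∈ ysOf points x1 x2 := (mem_ysOf points x1 x2 y2).2 ⟨h12, h22⟩
  obtain ⟨c, d, hc, hd, hcd, hyc, hyd⟩ := indices_of_mem_lt _ (pairwise_ysOf points x1 x2) hy1 hy2 hy
  have hgi : PySem.List.pyGetD (xsOf points) ((i : Nat) : Int) 0 = x1 := by
    rw [PySem.List.pyGetD_natCast, List.getD_eq_getElem _ _ hi, hxi]
  have hgj : PySem.List.pyGetD (xsOf points) ((j : Nat) : Int) 0 = x2 := by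
    rw [PySem.List.pyGetD_natCast, List.getD_eq_getElem _ _ hj, hxj]
  refine ⟨(x2 - x1) * ((ysOf points x1 x2)[c + 1]'(by omega) - y1), ?_, ?_⟩
  · unfold LB
    simp only [List.mem_flatMap, List.mem_map, PySem.List.mem_pyRange_one]
    refine ⟨(i : Int), ⟨by omega, by omega⟩, (j : Int), ⟨by omega, by omega⟩, ?_⟩
    rw [hgi, hgj]
    refine ⟨((c + 1 : Nat) : Int), ⟨by push_cast; omega, by push_cast; omega⟩, ?_⟩
    have e1 : ((c + 1 : Nat) : Int) - 1 = ((c : Nat) : Int) := by push_cast; ring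
    rw [e1, PySem.List.pyGetD_natCast, PySem.List.pyGetD_natCast,
        List.getD_eq_getElem _ _ (by omega : c + 1 < (ysOf points x1 x2).length),
        List.getD_eq_getElem _ _ hc, hyc]
  · have h1 : (ysOf points x1 x2)[c + 1]'(by omega) ≤ y2 := by
      rcases Nat.eq_or_lt_of_le (by omega : c + 1 ≤ d) with e | hlt
      · rw [← hyd]; exact le_of_eq (by congr 1)
      · have := List.pairwise_iff_getElem.1 (pairwise_ysOf points x1 x2) (c + 1) d (by omega) hd hlt
        rw [hyd] at this; exact le_of_lt this
    exact mul_le_mul_of_nonneg_left (by omega) (by omega)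

theorem Rect_pos (points : List (List Int)) (v : Int) : Rect points v → 0 < v := by
  rintro ⟨x1, x2, y1, y2, h1, h2, -, -, -, -, rfl⟩
  exact mul_pos (by omega) (by omega)

theorem foldl_mstep_pos (l : List Int) (c : Int) (hc : 0 < c) (h : ∀ a ∈ l, 0 < a) :
    l.foldl mstep c = l.foldl min c := by
  induction l generalizing c with
  | nil => rfl
  | cons a t ih =>
    have ha : 0 < a := h a (by simp)
    have : mstep c a = min c a := by
      unfold mstep
      rcases lt_or_ge a c with h1 | h1
      · simp only [if_pos (Or.inr h1)]
        omega
      · simp only [min_def]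
        split <;> omega
    rw [List.foldl_cons, List.foldl_cons, this]
    exact ih (min c a) (lt_min hc ha) (fun b hb => h b (by simp [hb]))

theorem foldl_mstep_eq_min? (l : List Int) (h : ∀ a ∈ l, 0 < a) :
    l.foldl mstep 0 = l.min?.getD 0 := by
  cases l with
  | nil => rfl
  | cons a t =>
    have ha : 0 < a := h a (by simp)
    have h1 : mstep 0 a = a := by unfold mstep; simp
    rw [List.foldl_cons, h1, List.min?_cons', Option.getD_some]
    exact foldl_mstep_pos t a ha (fun b hb => h b (by simp [hb]))

theorem min?_eq_of_dominated (A B : List Int) (hBA : ∀ b ∈ B, b ∈ A)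
    (hAB : ∀ a ∈ A, ∃ b ∈ B, b ≤ a) : A.min?.getD 0 = B.min?.getD 0 := by
  cases hA : A.min? with
  | none =>
    rw [List.min?_eq_none_iff] at hA
    cases hB : B.min? with
    | none => rfl
    | some mb =>
      have := List.min?_mem hB
      exact absurd (hBA mb this) (by simp [hA])
  | some ma =>
    rw [List.min?_eq_some_iff] at hA
    obtain ⟨hmemA, hleA⟩ := hA
    obtain ⟨b, hbB, hba⟩ := hAB ma hmemA
    cases hB : B.min? with
    | none => rw [List.min?_eq_none_iff] at hB; simp [hB] at hbB
    | some mb =>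
      rw [List.min?_eq_some_iff] at hB
      obtain ⟨hmemB, hleB⟩ := hB
      simp only [Option.getD_some]
      exact le_antisymm (hleA mb (hBA mb hmemB)) (le_trans (hleB b hbB) hba)

-- ===== VERDICT (by name: the statement is the Claim_ definition above) =====
theorem minimumAreaRectangle_spec : Claim_equal_minimumAreaRectangle := by
  intro points _ _
  show minimumAreaRectangle points = minimumAreaRectangle_alt points
  rw [A_eq_foldl_LA, B_eq_foldl_LB,
      foldl_mstep_eq_min? _ (fun a ha => Rect_pos points a ((mem_LA_iff_Rect points a).1 ha)),
      foldl_mstep_eq_min? _ (fun a ha => Rect_pos points a (mem_LB_Rect points a ha))]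
  exact min?_eq_of_dominated _ _
    (fun b hb => (mem_LA_iff_Rect points b).2 (mem_LB_Rect points b hb))
    (fun a ha => Rect_le_LB points a ((mem_LA_iff_Rect points a).1 ha))
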